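-- pv_equiv track=rewrite | github.com/skywang00000/final_project | APP.py | binary_search_visualization
-- ===== SOURCE A (Python) =====
-- def binary_search_visualization(arr_text, target):
--     try:
--         arr = [int(x.strip()) for x in arr_text.split(",") if x.strip() != ""]
--         target = int(target)
--     except Exception:
--         return "Please provide a valid comma-separated list of integers and an integer target."
--
--     if len(arr) == 0:
--         return "The array is empty. Provide at least one integer."
--
--     is_sorted = all(arr[i] <= arr[i+1] for i in range(len(arr)-1))
--     if not is_sorted:
--         return "The array must be sorted in non-decreasing order."
--
--     left = 0
--     right = len(arr) - 1
--     step_count = 0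
--     steps = []
--
--     while left <= right:
--         step_count += 1
--         mid = (left + right) // 2
--         mid_val = arr[mid]
--
--         steps.append(f"Step {step_count}: search range [{left}, {right}], mid = {mid}, mid_value = {mid_val}")
--
--         if mid_val == target:
--             steps.append(f"<!!!!>Found target {target} at index {mid}.")
--             break
--         elif mid_val < target:
--             left = mid + 1
--             steps.append(f"Mid moves to right:{mid_val} < {target}, searching right half.")
--         else:
--             right = mid - 1
--             steps.append(f"Mid moves to left:{mid_val} > {target}, searching left half.")
--     else:
--         steps.append(f"Target {target} not found in the array.")
--
--     return "\n".join(steps)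
-- ===== SOURCE B (Python) =====
-- def _trace(arr, target, left, right, n):
--     # phase 1: collect numeric search states only; no strings here
--     if left > right:
--         return [], False
--     n += 1
--     mid = (left + right) // 2
--     v = arr[mid]
--     e = (n, left, right, mid, v)
--     if v == target:
--         return [e], True
--     if v < target:
--         es, f = _trace(arr, target, mid + 1, right, n)
--     else:
--         es, f = _trace(arr, target, left, mid - 1, n)
--     return [e] + es, f
--
--
-- def _render(target, e):
--     # phase 2: turn one recorded state into its one or two report lines
--     n, l, r, m, v = e
--     lines = [f"Step {n}: search range [{l}, {r}], mid = {m}, mid_value = {v}"]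
--     if v == target:
--         lines.append(f"<!!!!>Found target {target} at index {m}.")
--     elif v < target:
--         lines.append(f"Mid moves to right:{v} < {target}, searching right half.")
--     else:
--         lines.append(f"Mid moves to left:{v} > {target}, searching left half.")
--     return lines
--
--
-- def binary_search_visualization(arr_text, target):
--     toks = [t for t in (x.strip() for x in arr_text.split(",")) if t]
--     try:
--         arr = [int(t) for t in toks]
--         target = int(target)
--     except Exception:
--         return "Please provide a valid comma-separated list of integers and an integer target."
--
--     if not arr:
--         return "The array is empty. Provide at least one integer."
--
--     if any(a > b for a, b in zip(arr, arr[1:])):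
--         return "The array must be sorted in non-decreasing order."
--
--     events, found = _trace(arr, target, 0, len(arr) - 1, 0)
--     lines = [line for e in events for line in _render(target, e)]
--     if not found:
--         lines.append(f"Target {target} not found in the array.")
--     return "\n".join(lines)
-- ===== Notes on version B (the rewrite author's own statement) =====
-- stated objective: alternative
-- what changed: A's single while-loop that interleaves searching with string building (plus a while-else) is replaced by a two-phase design: a pure recursion first records the numeric search states (step, left, right, mid, value) as tuples, and a separate rendering pass then formats each state into its lines; the parse is restaged (strip/filter tokens first, then convert) and the sorted check uses zip of adjacent pairs instead of index arithmetic.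
import Mathlib
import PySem

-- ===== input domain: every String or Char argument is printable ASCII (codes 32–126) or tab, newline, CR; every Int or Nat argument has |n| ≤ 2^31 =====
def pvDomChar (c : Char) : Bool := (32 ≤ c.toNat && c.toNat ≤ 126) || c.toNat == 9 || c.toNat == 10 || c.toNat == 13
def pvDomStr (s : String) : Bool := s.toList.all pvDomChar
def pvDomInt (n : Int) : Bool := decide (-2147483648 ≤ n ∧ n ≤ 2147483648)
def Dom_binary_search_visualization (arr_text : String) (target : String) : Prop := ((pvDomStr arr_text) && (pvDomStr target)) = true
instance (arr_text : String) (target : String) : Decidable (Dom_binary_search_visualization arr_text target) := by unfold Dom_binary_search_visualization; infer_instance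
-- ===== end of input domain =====

-- B replaces A's single while-loop that interleaves searching with string building by a two-phase
-- design: a pure recursion records the numeric search states, a separate pass renders them
-- (objective: alternative).

-- ===== PORT A =====
-- [int(x.strip()) for x in arr_text.split(",") if x.strip() != ""]; none = some element raised ValueError
def pvParseItems : List String → Option (List Int)
  | [] => some []
  | x :: rest =>
    let s := PySem.Str.strip x
    if s = "" then pvParseItems rest
    else
      match PySem.Int.ofStr? s with
      | none => none
      | some n =>
        match pvParseItems rest with
        | none => none
        | some l => some (n :: l)

-- all(arr[i] <= arr[i+1] for i in range(len(arr)-1)); pyGetD is exact here: i, i+1 are in range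
def pvIsSorted (arr : List Int) : Bool :=
  (PySem.List.pyRange 0 ((arr.length : Int) - 1) 1).all
    (fun i => decide (PySem.List.pyGetD arr i 0 ≤ PySem.List.pyGetD arr (i + 1) 0))

-- A's while-loop: state (left, right, step_count, steps accumulator); while-else appends "not found"
def pvLoopA (arr : List Int) (target left right step_count : Int) (steps : List String) : List String :=
  if h : left ≤ right then
    let sc := step_count + 1
    let mid := PySem.Int.floordiv (left + right) 2
    let mid_val := PySem.List.pyGetD arr mid 0
    let steps' := steps ++ ["Step " ++ PySem.Int.toStr sc ++ ": search range [" ++ PySem.Int.toStr left ++ ", " ++ PySem.Int.toStr right ++ "], mid = " ++ PySem.Int.toStr mid ++ ", mid_value = " ++ PySem.Int.toStr mid_val]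
    if mid_val == target then
      steps' ++ ["<!!!!>Found target " ++ PySem.Int.toStr target ++ " at index " ++ PySem.Int.toStr mid ++ "."]
    else if mid_val < target then
      pvLoopA arr target (mid + 1) right sc (steps' ++ ["Mid moves to right:" ++ PySem.Int.toStr mid_val ++ " < " ++ PySem.Int.toStr target ++ ", searching right half."])
    else
      pvLoopA arr target left (mid - 1) sc (steps' ++ ["Mid moves to left:" ++ PySem.Int.toStr mid_val ++ " > " ++ PySem.Int.toStr target ++ ", searching left half."])
  else
    steps ++ ["Target " ++ PySem.Int.toStr target ++ " not found in the array."]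
termination_by (right + 1 - left).toNat
decreasing_by
  · have := PySem.Int.floordiv_two_mid_bounds h; omega
  · have := PySem.Int.floordiv_two_mid_bounds h; omega

def binary_search_visualization (arr_text : String) (target : String) : String :=
  match pvParseItems ((PySem.Str.split? arr_text ",").getD []), PySem.Int.ofStr? target with
  | some arr, some t =>
    if arr.length == 0 then "The array is empty. Provide at least one integer."
    else if !pvIsSorted arr then "The array must be sorted in non-decreasing order."
    else PySem.Str.join "\n" (pvLoopA arr t 0 ((arr.length : Int) - 1) 0 [])
  | _, _ => "Please provide a valid comma-separated list of integers and an integer target."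

-- ===== PORT B =====
-- toks = [t for t in (x.strip() for x in arr_text.split(",")) if t]
def pvToksB (parts : List String) : List String :=
  (parts.map PySem.Str.strip).filter (fun t => !(t == ""))

-- arr = [int(t) for t in toks], none on the first ValueError
def pvIntsB : List String → Option (List Int)
  | [] => some []
  | t :: ts => do
    let n ← PySem.Int.ofStr? t
    let l ← pvIntsB ts
    some (n :: l)

-- any(a > b for a, b in zip(arr, arr[1:]))
def pvUnsortedB (arr : List Int) : Bool :=
  (arr.zip (arr.drop 1)).any (fun p => decide (p.1 > p.2))

-- phase 1 (_trace): the list of numeric states (step, left, right, mid, value) and the found flag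
def pvTraceB (arr : List Int) (target left right n : Int) : List (Int × Int × Int × Int × Int) × Bool :=
  if h : left > right then ([], false)
  else
    let n' := n + 1
    let mid := PySem.Int.floordiv (left + right) 2
    let v := PySem.List.pyGetD arr mid 0
    let e := (n', left, right, mid, v)
    if v == target then ([e], true)
    else if v < target then
      let (es, f) := pvTraceB arr target (mid + 1) right n'
      (e :: es, f)
    else
      let (es, f) := pvTraceB arr target left (mid - 1) n'
      (e :: es, f)
termination_by (right + 1 - left).toNat
decreasing_by
  · have := PySem.Int.floordiv_two_mid_bounds (show left ≤ right by omega); omega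
  · have := PySem.Int.floordiv_two_mid_bounds (show left ≤ right by omega); omega

-- phase 2 (_render): one recorded state → its one or two report lines
def pvRenderB (target : Int) (e : Int × Int × Int × Int × Int) : List String :=
  let (n, l, r, m, v) := e
  let head := "Step " ++ PySem.Int.toStr n ++ ": search range [" ++ PySem.Int.toStr l ++ ", " ++ PySem.Int.toStr r ++ "], mid = " ++ PySem.Int.toStr m ++ ", mid_value = " ++ PySem.Int.toStr v
  if v == target then [head, "<!!!!>Found target " ++ PySem.Int.toStr target ++ " at index " ++ PySem.Int.toStr m ++ "."]
  else if v < target then [head, "Mid moves to right:" ++ PySem.Int.toStr v ++ " < " ++ PySem.Int.toStr target ++ ", searching right half."]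
  else [head, "Mid moves to left:" ++ PySem.Int.toStr v ++ " > " ++ PySem.Int.toStr target ++ ", searching left half."]

def binary_search_visualization_alt (arr_text : String) (target : String) : String :=
  match pvIntsB (pvToksB ((PySem.Str.split? arr_text ",").getD [])) with
  | none => "Please provide a valid comma-separated list of integers and an integer target."
  | some arr =>
    match PySem.Int.ofStr? target with
    | none => "Please provide a valid comma-separated list of integers and an integer target."
    | some t =>
      if arr.isEmpty then "The array is empty. Provide at least one integer."
      else if pvUnsortedB arr then "The array must be sorted in non-decreasing order."
      else
        let (events, found) := pvTraceB arr t 0 ((arr.length : Int) - 1) 0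
        let lines := events.flatMap (pvRenderB t)
        PySem.Str.join "\n" (lines ++ if found then [] else ["Target " ++ PySem.Int.toStr t ++ " not found in the array."])

-- ===== PRECONDITION & SPEC =====
def Spec_binary_search_visualization (arr_text : String) (target : String) (out : String) : Prop := out = binary_search_visualization_alt arr_text target
instance (arr_text : String) (target : String) (out : String) : Decidable (Spec_binary_search_visualization arr_text target out) := by unfold Spec_binary_search_visualization; infer_instance

-- ===== CLAIM =====
def Claim_equal_binary_search_visualization : Prop := ∀ (arr_text : String) (target : String), Dom_binary_search_visualization arr_text target → Spec_binary_search_visualization arr_text target (binary_search_visualization arr_text target)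

-- ===== LEMMAS AND PROOFS =====

-- B's filter-then-convert parse agrees with A's single comprehension
theorem pvIntsB_toksB_eq (parts : List String) :
    pvIntsB (pvToksB parts) = pvParseItems parts := by
  induction parts with
  | nil => rfl
  | cons x rest ih =>
    simp only [pvToksB, List.map_cons, List.filter_cons] at ih ⊢
    by_cases h : PySem.Str.strip x = ""
    · simp [pvParseItems, h, ih]
    · rw [if_pos (show (!(PySem.Str.strip x == "")) = true by simp [h])]
      simp only [pvIntsB, ih, pvParseItems, if_neg h]
      rcases PySem.Int.ofStr? (PySem.Str.strip x) with _ | n <;>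
        rcases pvParseItems rest with _ | l <;> rfl

-- adjacent-pairs characterisation of the index-based sorted check
theorem pvSorted_key : ∀ (l : List Int),
    ((List.range (l.length - 1)).all fun k => decide (l.getD k 0 ≤ l.getD (k+1) 0))
      = (l.zip (l.drop 1)).all (fun p => decide (p.1 ≤ p.2))
  | [] => rfl
  | [_] => rfl
  | a :: b :: l' => by
    have ih := pvSorted_key (b :: l')
    simp only [List.length_cons, Nat.add_sub_cancel] at ih ⊢
    rw [List.range_succ_eq_map, List.all_cons, List.all_map]
    simp only [List.drop_succ_cons, List.drop_zero, List.zip_cons_cons, List.all_cons] at ih ⊢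
    congr 1


-- B's zip-of-adjacent-pairs check is the negation of A's index-based sorted check
theorem pvUnsortedB_eq (arr : List Int) : pvUnsortedB arr = !pvIsSorted arr := by
  unfold pvUnsortedB pvIsSorted
  rw [PySem.List.pyRange_one, List.all_map]
  have hlen : (((arr.length : Int)) - 1 - 0).toNat = arr.length - 1 := by omega
  rw [hlen]
  have h1 : (List.range (arr.length - 1)).all
        ((fun i => decide (PySem.List.pyGetD arr i 0 ≤ PySem.List.pyGetD arr (i + 1) 0)) ∘ fun k => 0 + (k : Int))
      = (List.range (arr.length - 1)).all (fun k => decide (arr.getD k 0 ≤ arr.getD (k+1) 0)) := by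
    apply List.all_congr rfl; intro k
    simp only [Function.comp, Int.zero_add]
    rw [show ((k:Int)+1) = (((k+1 : Nat)) : Int) by push_cast; ring]
    simp only [PySem.List.pyGetD_natCast]
  rw [h1, pvSorted_key, List.any_eq_not_all_not]
  congr 1
  apply List.all_congr rfl; intro p
  simp [← decide_not, not_lt]

-- A's string-building loop = B's numeric trace rendered and terminated
theorem pvLoopA_eq_trace (arr : List Int) (target left right step_count : Int) (steps : List String) :
    pvLoopA arr target left right step_count steps
      = steps ++ (pvTraceB arr target left right step_count).1.flatMap (pvRenderB target)
          ++ (if (pvTraceB arr target left right step_count).2 then ([] : List String)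
              else ["Target " ++ PySem.Int.toStr target ++ " not found in the array."]) := by
  fun_induction pvLoopA arr target left right step_count steps with
  | case1 left right c steps h sc mid mv st hEq =>
    rw [pvTraceB, dif_neg (show ¬ left > right by omega)]
    simp only [sc, mid, mv, st] at hEq ⊢
    rw [if_pos hEq]
    simp only [pvRenderB, List.flatMap_cons, List.flatMap_nil, List.append_nil, if_true]
    rw [if_pos hEq]
    simp only [List.append_assoc, List.cons_append, List.nil_append]
  | case2 left right c steps h sc mid mv st hEq hLt ih =>
    rw [pvTraceB, dif_neg (show ¬ left > right by omega)]
    simp only [sc, mid, mv, st] at hEq hLt ih ⊢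
    rw [if_neg hEq, if_pos hLt]
    rcases htb : pvTraceB arr target (PySem.Int.floordiv (left + right) 2 + 1) right (c + 1) with ⟨es, f⟩
    rw [htb] at ih
    simp only [List.flatMap_cons, pvRenderB]
    rw [if_neg hEq, if_pos hLt]
    simp only [List.append_assoc, List.cons_append, List.nil_append] at ih ⊢
    rw [ih]
  | case3 left right c steps h sc mid mv st hEq hLt ih =>
    rw [pvTraceB, dif_neg (show ¬ left > right by omega)]
    simp only [sc, mid, mv, st] at hEq hLt ih ⊢
    rw [if_neg hEq, if_neg hLt]
    rcases htb : pvTraceB arr target left (PySem.Int.floordiv (left + right) 2 - 1) (c + 1) with ⟨es, f⟩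
    rw [htb] at ih
    simp only [List.flatMap_cons, pvRenderB]
    rw [if_neg hEq, if_neg hLt]
    simp only [List.append_assoc, List.cons_append, List.nil_append] at ih ⊢
    rw [ih]
  | case4 left right c steps h =>
    rw [pvTraceB, dif_pos (show left > right by omega)]
    simp

-- ===== VERDICT =====
theorem binary_search_visualization_spec : Claim_equal_binary_search_visualization := by
  intro arr_text target _
  unfold Spec_binary_search_visualization binary_search_visualization binary_search_visualization_alt
  rw [pvIntsB_toksB_eq]
  rcases pvParseItems ((PySem.Str.split? arr_text ",").getD []) with _ | arr <;>
    rcases PySem.Int.ofStr? target with _ | t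
  · rfl
  · rfl
  · rfl
  · simp only [pvUnsortedB_eq, List.isEmpty_iff, beq_iff_eq, List.length_eq_zero_iff,
      Bool.not_eq_eq_eq_not, Bool.not_true]
    by_cases he : arr = []
    · simp [he]
    · rw [if_neg he, if_neg he]
      by_cases hs : pvIsSorted arr
      · rw [hs]
        simp only [if_false, reduceCtorEq]
        rcases htb : pvTraceB arr t 0 ((arr.length : Int) - 1) 0 with ⟨es, f⟩
        rw [pvLoopA_eq_trace, htb]
        simp
      · rw [Bool.not_eq_true] at hs
        rw [hs]
        simp
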